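-- pv_equiv track=rewrite | github.com/wattstrat/EOD | Utils/time_weighting.py | pertinent_dates
-- ===== SOURCE A (Python) =====
-- def pertinent_dates(start, end, milestones):
--     listdates = []
--     listbefore = []
--     listafter = []
--     for key in milestones:
--         if key >= start and key < end:
--             listdates.append(key)
--         elif key < start:
--             listbefore.append(key)
--         else:
--             listafter.append(key)
--     if listbefore:
--         listdates.append(max(listbefore))
--     if listafter:
--         listdates.append(min(listafter))
--     return sorted(listdates)
-- ===== SOURCE B (Python) =====
-- from bisect import bisect_left
--
--
-- def pertinent_dates(start, end, milestones):
--     s = sorted(milestones)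
--     lo = bisect_left(s, start)
--     hi = max(lo, bisect_left(s, end))
--     return s[(lo - 1 if lo > 0 else lo):(hi + 1 if hi < len(s) else hi)]
-- ===== Notes on version B (the rewrite author's own statement) =====
-- stated objective: alternative
-- what changed: B replaces A's three-bucket linear partition plus max/min plus final sort by sorting once and returning a contiguous slice s[lo':hi'] located with two bisect_left binary searches (clamping hi below lo for inverted ranges).
import Mathlib
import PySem

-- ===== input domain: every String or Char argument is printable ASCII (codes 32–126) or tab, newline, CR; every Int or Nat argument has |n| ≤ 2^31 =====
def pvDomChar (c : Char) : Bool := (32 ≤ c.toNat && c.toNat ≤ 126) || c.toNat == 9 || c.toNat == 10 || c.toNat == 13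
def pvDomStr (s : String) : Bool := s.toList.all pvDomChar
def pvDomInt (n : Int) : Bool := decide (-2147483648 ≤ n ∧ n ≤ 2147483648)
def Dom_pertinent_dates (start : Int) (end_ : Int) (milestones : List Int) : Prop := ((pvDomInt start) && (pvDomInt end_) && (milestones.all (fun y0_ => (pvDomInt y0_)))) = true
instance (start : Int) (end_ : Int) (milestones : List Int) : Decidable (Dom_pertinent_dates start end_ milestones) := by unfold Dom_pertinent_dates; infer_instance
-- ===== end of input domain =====

-- B sorts once and returns a contiguous slice found by two binary searches,
-- instead of A's three-bucket partition + max/min + final sort (alternative decomposition, not faster).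

-- ===== PORT A =====
-- one step of A's partition loop: append key to the dates / before / after bucket
def pdStep (start : Int) (end_ : Int) (acc : List Int × List Int × List Int) (key : Int) :
    List Int × List Int × List Int :=
  if start ≤ key ∧ key < end_ then (acc.1 ++ [key], acc.2.1, acc.2.2)
  else if key < start then (acc.1, acc.2.1 ++ [key], acc.2.2)
  else (acc.1, acc.2.1, acc.2.2 ++ [key])

def pertinent_dates (start : Int) (end_ : Int) (milestones : List Int) : List Int :=
  let st := milestones.foldl (pdStep start end_) ([], [], [])
  -- `if listbefore: listdates.append(max(listbefore))` — max? is none exactly on the empty list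
  let l1 := match PySem.List.max? st.2.1 (fun x => x) with
            | some m => st.1 ++ [m]
            | none => st.1
  let l2 := match PySem.List.min? st.2.2 (fun x => x) with
            | some m => l1 ++ [m]
            | none => l1
  PySem.List.sorted l2 (fun x => x)

-- ===== PORT B =====
def pertinent_dates_alt (start : Int) (end_ : Int) (milestones : List Int) : List Int :=
  let s := PySem.List.sorted milestones (fun x => x)
  let lo := PySem.List.bisectLeft s start
  let hi := max lo (PySem.List.bisectLeft s end_)
  PySem.List.slice s (some (if 0 < lo then (lo : Int) - 1 else (lo : Int)))
                     (some (if hi < s.length then (hi : Int) + 1 else (hi : Int)))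

-- ===== PRECONDITION & SPEC =====
def Spec_pertinent_dates (start : Int) (end_ : Int) (milestones : List Int) (out : List Int) : Prop := out = pertinent_dates_alt start end_ milestones
instance (start : Int) (end_ : Int) (milestones : List Int) (out : List Int) : Decidable (Spec_pertinent_dates start end_ milestones out) := by unfold Spec_pertinent_dates; infer_instance

-- ===== CLAIM (what is proved, stated in full; the proofs are below) =====
def Claim_equal_pertinent_dates : Prop := ∀ (start : Int) (end_ : Int) (milestones : List Int), Dom_pertinent_dates start end_ milestones → Spec_pertinent_dates start end_ milestones (pertinent_dates start end_ milestones)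

-- ===== LEMMAS AND PROOFS =====

-- A's loop computes the three filters
lemma pd_foldl (start end_ : Int) (ms : List Int) (a b c : List Int) :
    ms.foldl (pdStep start end_) (a, b, c) =
      (a ++ ms.filter (fun k => decide (start ≤ k ∧ k < end_)),
       b ++ ms.filter (fun k => decide (¬(start ≤ k ∧ k < end_) ∧ k < start)),
       c ++ ms.filter (fun k => decide (¬(start ≤ k ∧ k < end_) ∧ ¬(k < start)))) := by
  induction ms generalizing a b c with
  | nil => simp
  | cons x t ih =>
    simp only [List.foldl_cons, List.filter_cons, pdStep]
    by_cases h1 : start ≤ x ∧ x < end_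
    · simp [h1, ih]
    · by_cases h2 : x < start <;> simp [h1, h2, ih]

lemma filter_eq_window (s : List Int) (p : Int → Bool) (n m : Nat) (hnm : n ≤ m) (hm : m ≤ s.length)
    (h1 : ∀ j (hj : j < s.length), j < n → p s[j] = false)
    (h2 : ∀ j (hj : j < s.length), n ≤ j → j < m → p s[j] = true)
    (h3 : ∀ j (hj : j < s.length), m ≤ j → p s[j] = false) :
    s.filter p = (s.drop n).take (m - n) := by
  have hdec : s = s.take n ++ ((s.drop n).take (m - n) ++ s.drop m) := by
    have h4 : (s.drop n).drop (m - n) = s.drop m := by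
      rw [List.drop_drop]; congr 1; omega
    rw [← h4, List.take_append_drop, List.take_append_drop]
  conv_lhs => rw [hdec]
  rw [List.filter_append, List.filter_append]
  have e1 : (s.take n).filter p = [] := by
    rw [List.filter_eq_nil_iff]
    intro x hx
    obtain ⟨i, hi, hx⟩ := List.mem_iff_getElem.mp hx
    have hlen : (List.take n s).length = min n s.length := List.length_take
    have hi1 : i < n := by omega
    have hi' : i < s.length := by omega
    rw [List.getElem_take] at hx
    rw [← hx]
    simp [h1 i hi' hi1]
  have e2 : ((s.drop n).take (m - n)).filter p = (s.drop n).take (m - n) := by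
    rw [List.filter_eq_self]
    intro x hx
    obtain ⟨i, hi, hx⟩ := List.mem_iff_getElem.mp hx
    have hlen : ((s.drop n).take (m - n)).length = min (m - n) (s.length - n) := by
      simp [List.length_take, List.length_drop]
    have hi1 : i < m - n := by omega
    have hi' : n + i < s.length := by omega
    rw [List.getElem_take, List.getElem_drop] at hx
    rw [← hx]
    exact h2 (n + i) hi' (by omega) (by omega)
  have e3 : (s.drop m).filter p = [] := by
    rw [List.filter_eq_nil_iff]
    intro x hx
    obtain ⟨i, hi, hx⟩ := List.mem_iff_getElem.mp hx
    have hlen : (s.drop m).length = s.length - m := List.length_drop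
    have hi' : m + i < s.length := by omega
    rw [List.getElem_drop] at hx
    rw [← hx]
    simp [h3 (m + i) hi' (by omega)]
  rw [e1, e2, e3]
  simp

lemma windowL (s : List Int) (lo m : Nat) (h0 : 0 < lo) (hlm : lo ≤ m) (hls : lo ≤ s.length) :
    (s.drop (lo - 1)).take (m - (lo - 1)) = s[lo - 1]'(by omega) :: (s.drop lo).take (m - lo) := by
  have h1 : lo - 1 + 1 = lo := by omega
  have hd : s.drop (lo - 1) = s[lo - 1]'(by omega) :: s.drop lo := by
    rw [List.drop_eq_getElem_cons (by omega), h1]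
  have hm : m - (lo - 1) = (m - lo) + 1 := by omega
  rw [hd, hm, List.take_succ_cons]

lemma windowR (s : List Int) (lo hi : Nat) (hlh : lo ≤ hi) (hL : hi < s.length) :
    (s.drop lo).take (hi + 1 - lo) = (s.drop lo).take (hi - lo) ++ [s[hi]] := by
  have h1 : hi + 1 - lo = (hi - lo) + 1 := by omega
  have h2 : lo + (hi - lo) = hi := by omega
  rw [h1, List.take_add_one, List.getElem?_drop, h2, List.getElem?_eq_getElem hL]
  rfl

theorem pd_eq (start end_ : Int) (ms : List Int) :
    pertinent_dates start end_ ms = pertinent_dates_alt start end_ ms := by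
  unfold pertinent_dates pertinent_dates_alt
  rw [pd_foldl]
  simp only [List.nil_append]
  set s := PySem.List.sorted ms (fun x => x) with hs
  have hperm : s.Perm ms := PySem.List.sorted_perm ms _ false
  have hpair : s.Pairwise (fun a b : Int => a ≤ b) := PySem.List.sorted_pairwise ms _
  have hmono : ∀ i j (hi : i < s.length) (hj : j < s.length), i ≤ j → s[i] ≤ s[j] := by
    intro i j hi hj hij
    rcases Nat.lt_or_ge i j with h | h
    · exact (List.pairwise_iff_getElem.mp hpair) i j hi hj h
    · have : i = j := by omega
      subst this; rfl
  set lo := PySem.List.bisectLeft s start with hlo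
  set bb := PySem.List.bisectLeft s end_ with hbb
  obtain ⟨hlo_le, hlo_lt, hlo_ge⟩ := PySem.List.bisectLeft_spec s start hpair
  obtain ⟨hb_le, hb_lt, hb_ge⟩ := PySem.List.bisectLeft_spec s end_ hpair
  set hi := max lo bb with hhi
  have hhi_le : hi ≤ s.length := by omega
  have hlohi : lo ≤ hi := le_max_left _ _
  have hF1 : s.filter (fun k => decide (start ≤ k ∧ k < end_)) = (s.drop lo).take (hi - lo) := by
    apply filter_eq_window s (fun k => decide (start ≤ k ∧ k < end_)) lo hi hlohi hhi_le
    · intro j hj hjlo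
      have := hlo_lt j hj hjlo
      exact decide_eq_false (by omega)
    · intro j hj hjlo hjhi
      have h1 := hlo_ge j hj hjlo
      have h2 := hb_lt j hj (by omega)
      exact decide_eq_true (by omega)
    · intro j hj hjhi
      have h1 := hlo_ge j hj (by omega)
      have h2 := hb_ge j hj (by omega)
      exact decide_eq_false (by omega)
  have hF2 : s.filter (fun k => decide (¬(start ≤ k ∧ k < end_) ∧ k < start)) = s.take lo := by
    have h := filter_eq_window s (fun k => decide (¬(start ≤ k ∧ k < end_) ∧ k < start))
        0 lo (Nat.zero_le _) hlo_le
      (by intro j hj hj0; omega)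
      (by intro j hj _ hjlo
          have := hlo_lt j hj hjlo
          exact decide_eq_true (by omega))
      (by intro j hj hjlo
          have := hlo_ge j hj hjlo
          exact decide_eq_false (by omega))
    simpa using h
  have hF3 : s.filter (fun k => decide (¬(start ≤ k ∧ k < end_) ∧ ¬(k < start))) = s.drop hi := by
    have h := filter_eq_window s (fun k => decide (¬(start ≤ k ∧ k < end_) ∧ ¬(k < start)))
        hi s.length hhi_le le_rfl
      (by intro j hj hjhi
          rcases Nat.lt_or_ge j lo with hl | hl
          · have := hlo_lt j hj hl
            exact decide_eq_false (by omega)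
          · have h1 := hlo_ge j hj hl
            have h2 := hb_lt j hj (by omega)
            exact decide_eq_false (by omega))
      (by intro j hj hjhi _
          have h1 := hlo_ge j hj (by omega)
          have h2 := hb_ge j hj (by omega)
          exact decide_eq_true (by omega))
      (by intro j hj hjl; omega)
    rw [h, List.take_of_length_le (by simp)]
  have hP1 : ((s.drop lo).take (hi - lo)).Perm
      (ms.filter (fun k => decide (start ≤ k ∧ k < end_))) := by
    rw [← hF1]; exact hperm.filter _
  have hP2 : ((ms.filter (fun k => decide (¬(start ≤ k ∧ k < end_) ∧ k < start)))).Perm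
      (s.take lo) := by
    rw [← hF2]; exact (hperm.filter _).symm
  have hP3 : ((ms.filter (fun k => decide (¬(start ≤ k ∧ k < end_) ∧ ¬(k < start))))).Perm
      (s.drop hi) := by
    rw [← hF3]; exact (hperm.filter _).symm
  have hz2 : lo = 0 → PySem.List.max?
      (ms.filter (fun k => decide (¬(start ≤ k ∧ k < end_) ∧ k < start))) (fun x => x) = none := by
    intro h0
    rw [PySem.List.max?_eq_none_iff]
    have hlen : (ms.filter (fun k => decide (¬(start ≤ k ∧ k < end_) ∧ k < start))).length = 0 := by
      rw [hP2.length_eq, h0]; simp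
    exact List.eq_nil_of_length_eq_zero hlen
  have hz3 : hi = s.length → PySem.List.min?
      (ms.filter (fun k => decide (¬(start ≤ k ∧ k < end_) ∧ ¬(k < start)))) (fun x => x) = none := by
    intro hL
    rw [PySem.List.min?_eq_none_iff]
    have hlen : (ms.filter (fun k => decide (¬(start ≤ k ∧ k < end_) ∧ ¬(k < start)))).length = 0 := by
      rw [hP3.length_eq, hL]; simp
    exact List.eq_nil_of_length_eq_zero hlen
  have hmax2 : ∀ h0 : 0 < lo, PySem.List.max?
      (ms.filter (fun k => decide (¬(start ≤ k ∧ k < end_) ∧ k < start))) (fun x => x)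
      = some (s[lo - 1]'(by omega)) := by
    intro h0
    set t := ms.filter (fun k => decide (¬(start ≤ k ∧ k < end_) ∧ k < start)) with ht
    have hlt : lo - 1 < s.length := by omega
    have hlen : t.length = lo := by
      rw [hP2.length_eq]; simp; omega
    cases hmx : PySem.List.max? t (fun x => x) with
    | none =>
      rw [PySem.List.max?_eq_none_iff] at hmx
      rw [hmx] at hlen; simp at hlen; omega
    | some m =>
      congr 1
      have hmmem : m ∈ s.take lo := hP2.mem_iff.mp (PySem.List.max?_mem hmx)
      obtain ⟨i, hit, him⟩ := List.mem_iff_getElem.mp hmmem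
      have hitl : i < lo := by simp at hit; omega
      have hi' : i < s.length := by simp at hit; omega
      rw [List.getElem_take] at him
      have h1 : m ≤ s[lo - 1] := him ▸ hmono i (lo - 1) hi' hlt (by omega)
      have hsm : s[lo - 1] ∈ t := by
        apply hP2.mem_iff.mpr
        apply List.mem_iff_getElem.mpr
        refine ⟨lo - 1, by simp; omega, ?_⟩
        rw [List.getElem_take]
      have h2 : s[lo - 1] ≤ m := PySem.List.max?_isMax hmx _ hsm
      omega
  have hmin3 : ∀ hL : hi < s.length, PySem.List.min?
      (ms.filter (fun k => decide (¬(start ≤ k ∧ k < end_) ∧ ¬(k < start)))) (fun x => x)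
      = some (s[hi]'(by omega)) := by
    intro hL
    set t := ms.filter (fun k => decide (¬(start ≤ k ∧ k < end_) ∧ ¬(k < start))) with ht
    have hlen : t.length = s.length - hi := by
      rw [hP3.length_eq]; simp
    cases hmn : PySem.List.min? t (fun x => x) with
    | none =>
      rw [PySem.List.min?_eq_none_iff] at hmn
      rw [hmn] at hlen; simp at hlen; omega
    | some m =>
      congr 1
      have hmmem : m ∈ s.drop hi := hP3.mem_iff.mp (PySem.List.min?_mem hmn)
      obtain ⟨i, hit, him⟩ := List.mem_iff_getElem.mp hmmem
      have hi' : hi + i < s.length := by simp at hit; omega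
      rw [List.getElem_drop] at him
      have h1 : s[hi] ≤ m := him ▸ hmono hi (hi + i) hL hi' (by omega)
      have hsm : s[hi] ∈ t := by
        apply hP3.mem_iff.mpr
        apply List.mem_iff_getElem.mpr
        refine ⟨0, by simp; omega, ?_⟩
        rw [List.getElem_drop]
        simp
      have h2 : m ≤ s[hi] := PySem.List.min?_isMin hmn _ hsm
      omega
  have hsub : ∀ a b : Nat, ((s.drop a).take b).Pairwise (fun x y : Int => x ≤ y) := by
    intro a b
    exact hpair.sublist ((List.take_sublist _ _).trans (List.drop_sublist _ _))
  rcases Nat.eq_zero_or_pos lo with h0 | h0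
  · rcases Nat.lt_or_ge hi s.length with hL | hL
    · -- lo = 0, hi < length: no before-bucket, an after-bucket
      rw [hz2 h0, hmin3 hL]
      rw [if_neg (by omega), if_pos hL]
      have hc : ((hi : Int) + 1) = (((hi + 1 : Nat)) : Int) := by push_cast; ring
      rw [hc, PySem.List.slice_natCast, windowR s lo hi hlohi hL]
      have hpw := hsub lo (hi + 1 - lo)
      rw [windowR s lo hi hlohi hL] at hpw
      exact PySem.List.sorted_id_eq_of_perm_of_pairwise _ _ (hP1.append_right _) hpw
    · have hL' : hi = s.length := by omega
      rw [hz2 h0, hz3 hL']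
      rw [if_neg (by omega), if_neg (by omega)]
      rw [PySem.List.slice_natCast]
      exact PySem.List.sorted_id_eq_of_perm_of_pairwise _ _ hP1 (hsub lo (hi - lo))
  · have hc1 : ((lo : Int) - 1) = (((lo - 1 : Nat)) : Int) := by
      rw [Nat.cast_sub (by omega : 1 ≤ lo)]; simp
    rcases Nat.lt_or_ge hi s.length with hL | hL
    · -- lo > 0, hi < length: both boundary elements
      rw [hmax2 h0, hmin3 hL]
      rw [if_pos h0, if_pos hL]
      have hc2 : ((hi : Int) + 1) = (((hi + 1 : Nat)) : Int) := by push_cast; ring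
      rw [hc1, hc2, PySem.List.slice_natCast,
        windowL s lo (hi + 1) h0 (by omega) (by omega), windowR s lo hi hlohi hL]
      have hperm' : (s[lo - 1]'(by omega) :: ((s.drop lo).take (hi - lo) ++ [s[hi]])).Perm
          ((ms.filter (fun k => decide (start ≤ k ∧ k < end_)) ++ [s[lo - 1]'(by omega)]) ++ [s[hi]]) := by
        have e : (s[lo - 1]'(by omega) :: ((s.drop lo).take (hi - lo) ++ [s[hi]]))
            = ([s[lo - 1]'(by omega)] ++ (s.drop lo).take (hi - lo)) ++ [s[hi]] := by simp
        rw [e]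
        exact (List.perm_append_comm.trans (hP1.append_right _)).append_right _
      have hpw := hsub (lo - 1) (hi + 1 - (lo - 1))
      rw [windowL s lo (hi + 1) h0 (by omega) (by omega), windowR s lo hi hlohi hL] at hpw
      exact PySem.List.sorted_id_eq_of_perm_of_pairwise _ _ hperm' hpw
    · have hL' : hi = s.length := by omega
      rw [hmax2 h0, hz3 hL']
      rw [if_pos h0, if_neg (by omega)]
      rw [hc1, PySem.List.slice_natCast, windowL s lo hi h0 hlohi (by omega)]
      have hperm' : (s[lo - 1]'(by omega) :: (s.drop lo).take (hi - lo)).Perm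
          (ms.filter (fun k => decide (start ≤ k ∧ k < end_)) ++ [s[lo - 1]'(by omega)]) := by
        have e : (s[lo - 1]'(by omega) :: (s.drop lo).take (hi - lo))
            = [s[lo - 1]'(by omega)] ++ (s.drop lo).take (hi - lo) := by simp
        rw [e]
        exact List.perm_append_comm.trans (hP1.append_right _)
      have hpw := hsub (lo - 1) (hi - (lo - 1))
      rw [windowL s lo hi h0 hlohi (by omega)] at hpw
      exact PySem.List.sorted_id_eq_of_perm_of_pairwise _ _ hperm' hpw


-- ===== VERDICT (by name: the statement is the Claim_ definition above) =====
theorem pertinent_dates_spec : Claim_equal_pertinent_dates := by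
  intro start end_ ms _
  unfold Spec_pertinent_dates
  exact pd_eq start end_ ms
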